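-- pv_equiv track=rewrite | github.com/14BNB92/itd_reg_bot | handlers/mail.py | select_by_criteria
-- ===== SOURCE A (Python) =====
-- def select_by_criteria(data, items):
--     if items == ['+']:
--         return [i for i in range(len(data))]
--     indexes = []
--     for i in range(len(data)):
--         flag = 0
--         for item in items:
--             if item in data[i]:
--                 flag = 1
--                 break
--         if flag == 1:
--             indexes.append(i)
--     return indexes
-- ===== SOURCE B (Python) =====
-- def select_by_criteria(data, items):
--     if items == ['+']:
--         return list(range(len(data)))
--     # successively filter the still-unmatched indices by each item; what is
--     # left at the end matched no item, so the answer is its complement.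
--     unmatched = list(range(len(data)))
--     for item in items:
--         if not unmatched:
--             break
--         unmatched = [i for i in unmatched if item not in data[i]]
--     rest = set(unmatched)
--     return [i for i in range(len(data)) if i not in rest]
-- ===== Notes on version B (the rewrite author's own statement) =====
-- stated objective: alternative
-- what changed: B computes the complement: it loops over items (not data), successively filtering the list of still-unmatched indices by each item and stopping early when none remain, then returns the indices of range(len(data)) outside that residue; A scans each data element's items with a flag and break.
import Mathlib
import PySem

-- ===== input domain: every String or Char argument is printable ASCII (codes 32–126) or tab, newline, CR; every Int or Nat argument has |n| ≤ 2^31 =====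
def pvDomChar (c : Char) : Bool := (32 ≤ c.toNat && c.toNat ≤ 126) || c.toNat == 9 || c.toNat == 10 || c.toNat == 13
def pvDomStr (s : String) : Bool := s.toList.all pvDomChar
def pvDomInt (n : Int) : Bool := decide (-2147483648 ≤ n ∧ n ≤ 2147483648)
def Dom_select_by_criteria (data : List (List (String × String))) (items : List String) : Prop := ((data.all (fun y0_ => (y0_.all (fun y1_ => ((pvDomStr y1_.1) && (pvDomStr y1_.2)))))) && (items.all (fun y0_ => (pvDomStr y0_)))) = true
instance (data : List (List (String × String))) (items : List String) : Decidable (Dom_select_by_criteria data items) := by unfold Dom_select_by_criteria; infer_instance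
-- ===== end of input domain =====

-- B loops over items (not data), successively filtering the still-unmatched indices
-- by each item (stopping when none remain) and returns the complement of the residue.

-- ===== PORT A =====
-- inner 'for item in items: if item in data[i]: flag = 1; break' (dict membership = key membership)
def pvAFlag (items : List String) (row : List (String × String)) : Int :=
  match items with
  | [] => 0
  | it :: rest => if row.any (fun kv => kv.1 == it) then 1 else pvAFlag rest row

def select_by_criteria (data : List (List (String × String))) (items : List String) : List Int :=
  if items = ["+"] then
    PySem.List.pyRange 0 data.length 1
  else
    (PySem.List.pyRange 0 data.length 1).foldl
      (fun indexes i =>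
        if pvAFlag items (PySem.List.pyGetD data i []) = 1 then indexes ++ [i] else indexes) []

-- ===== PORT B =====
-- 'for item in items: if not unmatched: break; unmatched = [i for i in unmatched if item not in data[i]]'
def pvBUnmatched (data : List (List (String × String))) (items : List String) (u : List Int) : List Int :=
  match items with
  | [] => u
  | item :: restItems =>
      if u = [] then u
      else pvBUnmatched data restItems
        (u.filter (fun i => !(PySem.List.pyGetD data i []).any (fun kv => kv.1 == item)))

def select_by_criteria_alt (data : List (List (String × String))) (items : List String) : List Int :=
  if items = ["+"] then
    PySem.List.pyRange 0 data.length 1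
  else
    let unmatched := pvBUnmatched data items (PySem.List.pyRange 0 data.length 1)
    let rest : PySem.Set Int := PySem.Set.ofList unmatched
    (PySem.List.pyRange 0 data.length 1).filter (fun i => !(PySem.Set.contains rest i))

-- ===== PRECONDITION & SPEC =====
def Spec_select_by_criteria (data : List (List (String × String))) (items : List String) (out : List Int) : Prop := out = select_by_criteria_alt data items
instance (data : List (List (String × String))) (items : List String) (out : List Int) : Decidable (Spec_select_by_criteria data items out) := by unfold Spec_select_by_criteria; infer_instance

-- ===== CLAIM (what is proved, stated in full; the proofs are below) =====
def Claim_equal_select_by_criteria : Prop := ∀ (data : List (List (String × String))) (items : List String), Dom_select_by_criteria data items → Spec_select_by_criteria data items (select_by_criteria data items)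

-- ===== LEMMAS AND PROOFS =====

lemma pvAFlag_eq_one (items : List String) (row : List (String × String)) :
    (pvAFlag items row = 1) ↔ items.any (fun it => row.any (fun kv => kv.1 == it)) = true := by
  induction items with
  | nil => simp [pvAFlag]
  | cons it rest ih =>
      simp only [pvAFlag, List.any_cons]
      split_ifs with h <;> simp [h, ih]

-- A's loop is the filter of the index range by "some item is a key of the row"
lemma pvA_eq_filter (data : List (List (String × String))) (items : List String) (h : ¬ items = ["+"]) :
    select_by_criteria data items
      = (PySem.List.pyRange 0 data.length 1).filter
          (fun i => items.any (fun it => (PySem.List.pyGetD data i []).any (fun kv => kv.1 == it))) := by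
  unfold select_by_criteria
  rw [if_neg h]
  rw [PySem.List.foldl_append_ite_eq_filter
    (l := PySem.List.pyRange 0 data.length 1)
    (p := fun i => pvAFlag items (PySem.List.pyGetD data i []) = 1) (acc := [])]
  simp only [List.nil_append]
  apply List.filter_congr
  intro i _
  rw [Bool.eq_iff_iff]
  simp [pvAFlag_eq_one]

-- B's successive filtering is one filter by "no item is a key of the row"
-- (the 'if not unmatched: break' is a no-op semantically: filtering [] gives [])
lemma pvBUnmatched_eq_filter (data : List (List (String × String))) (items : List String)
    (u : List Int) :
    pvBUnmatched data items u
      = u.filter (fun i => !items.any (fun it => (PySem.List.pyGetD data i []).any (fun kv => kv.1 == it))) := by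
  induction items generalizing u with
  | nil => simp [pvBUnmatched]
  | cons item rest ih =>
      unfold pvBUnmatched
      split_ifs with hu
      · simp [hu]
      · rw [ih, List.filter_filter]
        apply List.filter_congr
        intro i _
        simp only [List.any_cons, Bool.not_or]
        rw [Bool.and_comm]

-- ===== VERDICT (by name: the statement is the Claim_ definition above) =====
theorem select_by_criteria_spec : Claim_equal_select_by_criteria := by
  intro data items _
  unfold Spec_select_by_criteria
  by_cases h : items = ["+"]
  · simp [select_by_criteria, select_by_criteria_alt, h]
  · rw [pvA_eq_filter data items h]
    unfold select_by_criteria_alt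
    rw [if_neg h]
    simp only [pvBUnmatched_eq_filter]
    apply List.filter_congr
    intro i hi
    rw [Bool.eq_iff_iff]
    have hmem : PySem.Set.contains
        (PySem.Set.ofList
          (List.filter (fun i => !items.any fun it => (PySem.List.pyGetD data i []).any fun kv => kv.1 == it)
            (PySem.List.pyRange 0 (data.length : Int) 1))) i = true
        ↔ (items.any fun it => (PySem.List.pyGetD data i []).any fun kv => kv.1 == it) = false := by
      rw [PySem.Set.contains_iff, PySem.Set.mem_ofList, List.mem_filter]
      simp [hi]
    simp only [Bool.not_eq_true']
    cases hc : PySem.Set.contains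
        (PySem.Set.ofList
          (List.filter (fun i => !items.any fun it => (PySem.List.pyGetD data i []).any fun kv => kv.1 == it)
            (PySem.List.pyRange 0 (data.length : Int) 1))) i with
    | true => simp [hmem.mp hc]
    | false =>
        cases hq : (items.any fun it => (PySem.List.pyGetD data i []).any fun kv => kv.1 == it) with
        | true => simp
        | false => exact absurd (hmem.mpr hq) (by simp only [hc]; decide)
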